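-- pv_equiv track=rewrite | github.com/UKPLab/arxiv2024-constrained-ctest-generation | C-Test Generation/Reimplemented Baseline/ctest/__init__.py | get_occurs_as_gap_matrix
-- ===== SOURCE A (Python) =====
-- def get_occurs_as_gap_matrix(data: dict) -> dict:
--     # Fetch the keys with similar words for each word
--     results = {k:[] for k in data.keys()}
--     words = set([x["word"].lower() for x in data.values()])
--     word_lookup = {w:[] for w in words}
--     for k,v in data.items():
--         word_lookup[v["word"].lower()].append(k)
--     for k,v in data.items():
--         tmp_words = word_lookup[v["word"].lower()].copy()
--         tmp_words.remove(k)
--         results[k] = tmp_words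
--     return results
-- ===== SOURCE B (Python) =====
-- def get_occurs_as_gap_matrix(data: dict) -> dict:
--     # Brute force: for each key, scan the whole dict for the other keys sharing
--     # the same lowercased word -- no grouping index, no intermediate dicts.
--     return {
--         k: [k2 for k2, v2 in data.items()
--             if k2 != k and v2["word"].lower() == v["word"].lower()]
--         for k, v in data.items()
--     }
-- ===== Notes on version B (the rewrite author's own statement) =====
-- stated objective: simpler
-- what changed: A builds a word set and a word->keys grouping dict and then copies and mutates each group with remove(); B drops the grouping index entirely and answers each key by a direct quadratic scan of the dict in one comprehension.
import Mathlib
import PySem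

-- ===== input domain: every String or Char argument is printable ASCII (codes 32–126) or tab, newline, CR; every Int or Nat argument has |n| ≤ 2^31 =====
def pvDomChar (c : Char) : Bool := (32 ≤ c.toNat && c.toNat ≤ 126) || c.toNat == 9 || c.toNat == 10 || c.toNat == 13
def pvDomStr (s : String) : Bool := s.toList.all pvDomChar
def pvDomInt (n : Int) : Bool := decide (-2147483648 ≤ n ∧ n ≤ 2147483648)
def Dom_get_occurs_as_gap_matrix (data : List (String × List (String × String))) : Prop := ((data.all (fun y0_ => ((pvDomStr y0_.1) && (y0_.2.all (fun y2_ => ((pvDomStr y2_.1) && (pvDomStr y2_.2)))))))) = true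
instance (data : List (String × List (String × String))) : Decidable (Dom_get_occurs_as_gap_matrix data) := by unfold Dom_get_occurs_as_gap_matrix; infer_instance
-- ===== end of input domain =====

-- B drops A's word set and word->keys grouping dict entirely and answers each key by a
-- direct quadratic scan of the dict in one comprehension (objective: simpler; not faster).

-- ===== PORT A =====
-- shared accessor: v["word"].lower()  (KeyError when "word" is absent: excluded by Pre_;
-- the .getD "" default is never reached on Pre_)
def pyWordLower (v : List (String × String)) : String :=
  PySem.Str.lower (((PySem.Dict.ofList v).get? "word").getD "")

def get_occurs_as_gap_matrix (data : List (String × List (String × String))) : List (String × List String) :=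
  -- results = {k:[] for k in data.keys()}
  let results : PySem.Dict String (List String) :=
    data.foldl (fun d p => d.insert p.1 []) PySem.Dict.empty
  -- words = set([x["word"].lower() for x in data.values()])
  let words : PySem.Set String := PySem.Set.ofList (data.map (fun p => pyWordLower p.2))
  -- word_lookup = {w:[] for w in words}
  let word_lookup : PySem.Dict String (List String) :=
    words.foldl (fun d w => d.insert w []) PySem.Dict.empty
  -- for k,v in data.items(): word_lookup[v["word"].lower()].append(k)
  let word_lookup :=
    data.foldl (fun d p => d.modify (pyWordLower p.2) [] (fun g => g ++ [p.1])) word_lookup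
  -- for k,v in data.items(): tmp = word_lookup[...].copy(); tmp.remove(k); results[k] = tmp
  let results :=
    data.foldl (fun r p =>
      let tmp_words := word_lookup.getD (pyWordLower p.2) []
      -- k was appended to its own group above, so list.remove never raises; .getD [] is unreachable
      let tmp_words := (PySem.List.remove? tmp_words p.1).getD []
      r.insert p.1 tmp_words) results
  results.items

-- ===== PORT B =====
def get_occurs_as_gap_matrix_alt (data : List (String × List (String × String))) : List (String × List String) :=
  -- {k: [k2 for k2,v2 in data.items() if k2 != k and v2["word"].lower() == v["word"].lower()]
  --  for k,v in data.items()}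
  (data.foldl (fun r p =>
      r.insert p.1
        ((data.filter (fun q => !(q.1 == p.1) && (pyWordLower q.2 == pyWordLower p.2))).map (·.1)))
    (PySem.Dict.empty : PySem.Dict String (List String))).items

-- ===== PRECONDITION & SPEC =====
-- Pre_ excludes association lists with duplicate outer keys (a Python dict cannot carry
-- them) and entries whose inner dict has no "word" key (A raises KeyError there).
def Pre_get_occurs_as_gap_matrix (data : List (String × List (String × String))) : Prop :=
  (data.map (·.1)).Nodup ∧ ∀ p ∈ data, (PySem.Dict.ofList p.2).contains "word" = true

instance (data : List (String × List (String × String))) : Decidable (Pre_get_occurs_as_gap_matrix data) := by unfold Pre_get_occurs_as_gap_matrix; infer_instance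

def pvWitness_get_occurs_as_gap_matrix : (List (String × List (String × String))) :=
  [("a", [("word", "Dog")]), ("b", [("word", "cat")]), ("c", [("word", "dog")])]

def Spec_get_occurs_as_gap_matrix (data : List (String × List (String × String))) (out : List (String × List String)) : Prop := out = get_occurs_as_gap_matrix_alt data
instance (data : List (String × List (String × String))) (out : List (String × List String)) : Decidable (Spec_get_occurs_as_gap_matrix data out) := by unfold Spec_get_occurs_as_gap_matrix; infer_instance

-- ===== CLAIM (what is proved, stated in full; the proofs are below) =====
def Claim_equal_get_occurs_as_gap_matrix : Prop := ∀ (data : List (String × List (String × String))), Dom_get_occurs_as_gap_matrix data → Pre_get_occurs_as_gap_matrix data → Spec_get_occurs_as_gap_matrix data (get_occurs_as_gap_matrix data)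

-- ===== LEMMAS AND PROOFS =====

-- the group of keys whose (lowercased) word is c, in data order
def grpL (data : List (String × List (String × String))) (c : String) : List String :=
  (data.filter (fun q => pyWordLower q.2 == c)).map (·.1)

-- initial word_lookup maps everything to []
theorem initLookup_getD (ws : List String) (d : PySem.Dict String (List String)) (c : String)
    (h : d.getD c [] = []) :
    (ws.foldl (fun d w => d.insert w []) d).getD c [] = [] := by
  induction ws generalizing d with
  | nil => exact h
  | cons w t ih =>
    refine ih _ ?_
    rw [PySem.Dict.getD_insert]
    split <;> simp [h]

-- the modify-append grouping loop computes grpL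
theorem groups_getD (l : List (String × List (String × String)))
    (d : PySem.Dict String (List String)) (c : String) :
    (l.foldl (fun d p => d.modify (pyWordLower p.2) [] (fun g => g ++ [p.1])) d).getD c []
      = d.getD c [] ++ grpL l c := by
  have h := PySem.Dict.getD_foldl_modify_append
    (l := l.map (fun p => (pyWordLower p.2, p.1))) (d := d) (c := c)
  rw [List.foldl_map] at h
  rw [h, grpL, List.filter_map, List.map_map]
  rfl

-- overwriting every key of an items-aligned dict rewrites the values in place
theorem overwrite_items (l : List (String × List (String × String)))
    (f g : String × List (String × String) → List String)
    (pre : List (String × List String)) (d : PySem.Dict String (List String))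
    (hnd : (pre.map (·.1) ++ l.map (·.1)).Nodup)
    (hd : d.items = pre ++ l.map (fun p => (p.1, g p))) :
    (l.foldl (fun r p => r.insert p.1 (f p)) d).items = pre ++ l.map (fun p => (p.1, f p)) := by
  induction l generalizing pre d with
  | nil => simpa using hd
  | cons p t ih =>
    rw [List.map_cons] at hnd
    have hndsplit := (List.nodup_append').mp hnd
    have hpnt : p.1 ∉ t.map (·.1) := by
      have := hndsplit.2.1
      simp only [List.nodup_cons] at this
      exact this.1
    have hppre : p.1 ∉ pre.map (·.1) := fun hmem =>
      hndsplit.2.2 hmem (by simp)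
    have hcont : d.contains p.1 = true := by
      rw [PySem.Dict.contains_eq_decide_mem_keys]
      simp only [PySem.Dict.keys, hd, decide_eq_true_eq]
      simp
    rw [List.foldl_cons]
    have hitems : (d.insert p.1 (f p)).items
        = (pre ++ [(p.1, f p)]) ++ t.map (fun q => (q.1, g q)) := by
      rw [PySem.Dict.items_insert_of_contains _ _ hcont, hd]
      rw [List.map_cons, List.map_append, List.map_cons]
      have h1 : pre.map (fun q => if q.1 == p.1 then (p.1, f p) else q) = pre := by
        conv_rhs => rw [← List.map_id pre]
        apply List.map_congr_left
        intro q hq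
        have hne : q.1 ≠ p.1 := fun h => hppre (h ▸ List.mem_map_of_mem hq)
        simp [hne]
      have h2 : (t.map (fun q => (q.1, g q))).map (fun q => if q.1 == p.1 then (p.1, f p) else q)
          = t.map (fun q => (q.1, g q)) := by
        rw [List.map_map]
        apply List.map_congr_left
        intro q hq
        have hne : q.1 ≠ p.1 := fun h => hpnt (h ▸ List.mem_map_of_mem hq)
        simp [hne]
      rw [h1, h2]
      simp
    have hnd' : ((pre ++ [(p.1, f p)]).map (·.1) ++ t.map (·.1)).Nodup := by
      simpa [List.append_assoc] using hnd
    have := ih (pre := pre ++ [(p.1, f p)]) (d := d.insert p.1 (f p)) hnd' hitems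
    rw [this]
    simp

-- B's per-key scan equals A's group with the key erased (keys nodup)
theorem scan_eq_erase (data : List (String × List (String × String)))
    (hnd : (data.map (·.1)).Nodup) (k w : String) :
    ((data.filter (fun q => !(q.1 == k) && (pyWordLower q.2 == w))).map (·.1))
      = (grpL data w).erase k := by
  have hndg : (grpL data w).Nodup := by
    refine hnd.sublist ?_
    exact List.Sublist.map (·.1) (List.filter_sublist (l := data))
  rw [List.Nodup.erase_eq_filter hndg k, grpL, List.filter_map, ← List.filter_filter]
  congr 1

-- ===== VERDICT (by name: the statement is the Claim_ definition above) =====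
theorem get_occurs_as_gap_matrix_spec : Claim_equal_get_occurs_as_gap_matrix := by
  intro data _ hpre
  obtain ⟨hnd, -⟩ := hpre
  unfold Spec_get_occurs_as_gap_matrix
  -- A as a map over data
  have hA : get_occurs_as_gap_matrix data
      = data.map (fun p => (p.1,
          (PySem.List.remove?
            ((data.foldl (fun d p => d.modify (pyWordLower p.2) [] (fun g => g ++ [p.1]))
              ((PySem.Set.ofList (data.map (fun p => pyWordLower p.2))).foldl
                (fun d w => d.insert w []) PySem.Dict.empty)).getD (pyWordLower p.2) [])
            p.1).getD [])) := by
    simp only [get_occurs_as_gap_matrix]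
    refine overwrite_items data _ (fun _ => []) [] _ (by simpa using hnd) ?_
    have h0 := PySem.Dict.items_foldl_insert_fresh data (fun p => p.1) (fun _ => ([] : List String))
      PySem.Dict.empty (fun a _ => by simp) hnd
    simpa using h0
  -- B as a map over data
  have hB : get_occurs_as_gap_matrix_alt data
      = data.map (fun p => (p.1,
          (data.filter (fun q => !(q.1 == p.1) && (pyWordLower q.2 == pyWordLower p.2))).map (·.1))) := by
    simp only [get_occurs_as_gap_matrix_alt]
    have h0 := PySem.Dict.items_foldl_insert_fresh data (fun p => p.1)
      (fun p => (data.filter (fun q => !(q.1 == p.1) && (pyWordLower q.2 == pyWordLower p.2))).map (·.1))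
      PySem.Dict.empty (fun a _ => by simp) hnd
    simpa using h0
  rw [hA, hB]
  apply List.map_congr_left
  intro p hp
  refine Prod.ext rfl ?_
  -- the shared group
  have hWL : ((data.foldl (fun d p => d.modify (pyWordLower p.2) [] (fun g => g ++ [p.1]))
      ((PySem.Set.ofList (data.map (fun p => pyWordLower p.2))).foldl
        (fun d w => d.insert w []) PySem.Dict.empty)).getD (pyWordLower p.2) [])
      = grpL data (pyWordLower p.2) := by
    rw [groups_getD, initLookup_getD _ _ _ (by simp)]
    simp
  have hmem : p.1 ∈ grpL data (pyWordLower p.2) := by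
    exact List.mem_map_of_mem (List.mem_filter.mpr ⟨hp, by simp⟩)
  simp only [hWL]
  rw [PySem.List.remove?_eq_some_erase _ _ hmem, Option.getD_some]
  exact (scan_eq_erase data hnd p.1 (pyWordLower p.2)).symm
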